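-- pv_equiv track=rewrite | github.com/jpmartirez/Permutopia | main.py | generate_circular_permutations
-- ===== SOURCE A (Python) =====
-- def generate_circular_permutations(arr):
--         n = len(arr)
--         if n == 0:
--                 return []
--
--         # Fix the first dancer to handle circular permutations
--         fixed_dancer = arr[0]
--         circular_permutations = []
--
--         # Initialize a list to hold current permutations
--         current_permutations = [[]]
--
--         # Iterate through the remaining dancers
--         for dancer in arr[1:]:
--                 new_permutations = []
--
--         # Create new permutations by adding the current dancer to existing permutations
--                 for perm in current_permutations:
--                         for i in range(len(perm) + 1):
--                                 new_permutations.append(perm[:i] + [dancer] + perm[i:])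
--
--                 current_permutations = new_permutations
--
--         # Add the fixed dancer to each permutation
--         for perm in current_permutations:
--                 circular_permutations.append([fixed_dancer] + perm)
--
--         return circular_permutations
-- ===== SOURCE B (Python) =====
-- def generate_circular_permutations(arr):
--     if len(arr) == 0:
--         return []
--
--     def f(elems):
--         if not elems:
--             return [[]]
--         perms = f(elems[:-1])
--         d = elems[-1]
--         return [p[:i] + [d] + p[i:] for p in perms for i in range(len(p) + 1)]
--
--     return [[arr[0]] + p for p in f(arr[1:])]
-- ===== Notes on version B (the rewrite author's own statement) =====
-- stated objective: alternative
-- what changed: Replaced the iterative accumulation (a loop maintaining current_permutations and rebuilding new_permutations with nested loops) by a recursive helper f that builds the permutations of all but the last element and inserts the last element at every position via a single comprehension.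
import Mathlib
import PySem

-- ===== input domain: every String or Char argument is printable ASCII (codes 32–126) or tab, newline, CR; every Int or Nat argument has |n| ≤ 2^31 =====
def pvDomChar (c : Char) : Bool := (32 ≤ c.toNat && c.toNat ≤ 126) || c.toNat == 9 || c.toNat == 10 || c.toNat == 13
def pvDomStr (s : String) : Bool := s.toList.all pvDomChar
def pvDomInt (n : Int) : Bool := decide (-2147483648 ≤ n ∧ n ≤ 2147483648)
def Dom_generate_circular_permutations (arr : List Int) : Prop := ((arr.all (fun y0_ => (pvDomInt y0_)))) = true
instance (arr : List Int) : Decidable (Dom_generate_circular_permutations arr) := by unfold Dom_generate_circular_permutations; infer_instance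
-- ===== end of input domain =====

-- ===== PORT A =====
def generate_circular_permutations (arr : List Int) : List (List Int) :=
  match arr with
  | [] => []
  | fixed_dancer :: rest =>
    -- for dancer in arr[1:]: nested loops appending perm[:i] + [dancer] + perm[i:]
    let current_permutations :=
      rest.foldl (fun cur dancer =>
        cur.foldl (fun new_permutations perm =>
          (List.range (perm.length + 1)).foldl (fun acc i =>
            acc ++ [perm.take i ++ dancer :: perm.drop i]) new_permutations) []) [[]]
    -- circular_permutations.append([fixed_dancer] + perm)
    current_permutations.foldl (fun acc perm => acc ++ [fixed_dancer :: perm]) []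

-- ===== PORT B =====
-- B's helper f: recursion peeling elems[-1]; [[]] on empty
def pvInsertEverywhere (d : Int) (p : List Int) : List (List Int) :=
  (List.range (p.length + 1)).map (fun i => p.take i ++ d :: p.drop i)

def pvPermsB (elems : List Int) : List (List Int) :=
  if h : elems = [] then [[]]
  else (pvPermsB elems.dropLast).flatMap (pvInsertEverywhere (elems.getLast h))
termination_by elems.length
decreasing_by
  have := List.length_pos_of_ne_nil h
  simp [List.length_dropLast]; omega

def generate_circular_permutations_alt (arr : List Int) : List (List Int) :=
  match arr with
  | [] => []
  | a0 :: rest => (pvPermsB rest).map (fun p => a0 :: p)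

-- ===== PRECONDITION & SPEC =====
def Spec_generate_circular_permutations (arr : List Int) (out : List (List Int)) : Prop := out = generate_circular_permutations_alt arr
instance (arr : List Int) (out : List (List Int)) : Decidable (Spec_generate_circular_permutations arr out) := by unfold Spec_generate_circular_permutations; infer_instance

-- ===== CLAIM (what is proved, stated in full; the proofs are below) =====
def Claim_equal_generate_circular_permutations : Prop := ∀ (arr : List Int), Dom_generate_circular_permutations arr → Spec_generate_circular_permutations arr (generate_circular_permutations arr)

-- ===== LEMMAS AND PROOFS =====

-- A's inner pair of loops over one dancer equals flatMap of insert-everywhere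
theorem pvStep_eq_flatMap (d : Int) (cur : List (List Int)) :
    cur.foldl (fun new_permutations perm =>
      (List.range (perm.length + 1)).foldl (fun acc i =>
        acc ++ [perm.take i ++ d :: perm.drop i]) new_permutations) []
    = cur.flatMap (pvInsertEverywhere d) := by
  have h : ∀ acc0 : List (List Int),
      cur.foldl (fun new_permutations perm =>
        (List.range (perm.length + 1)).foldl (fun acc i =>
          acc ++ [perm.take i ++ d :: perm.drop i]) new_permutations) acc0
      = cur.foldl (fun acc perm => acc ++ pvInsertEverywhere d perm) acc0 := by
    induction cur with
    | nil => intro acc0; rfl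
    | cons p ps ih =>
      intro acc0
      rw [List.foldl_cons, List.foldl_cons, PySem.List.foldl_append_singleton_eq_map, ih]
      rfl
  rw [h, PySem.List.foldl_append_eq_flatMap, List.nil_append]

-- B's right-peeling recursion computes A's left fold over the remaining dancers
theorem pvPermsB_eq_foldl (rest : List Int) :
    pvPermsB rest
    = rest.foldl (fun cur dancer =>
        cur.foldl (fun new_permutations perm =>
          (List.range (perm.length + 1)).foldl (fun acc i =>
            acc ++ [perm.take i ++ dancer :: perm.drop i]) new_permutations) []) [[]] := by
  induction rest using List.reverseRecOn with
  | nil => simp [pvPermsB]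
  | append_singleton es d ih =>
    rw [pvPermsB, dif_neg (by simp)]
    simp only [List.getLast_concat, List.dropLast_concat, List.foldl_concat]
    rw [ih, pvStep_eq_flatMap]

-- ===== VERDICT (by name: the statement is the Claim_ definition above) =====
theorem generate_circular_permutations_spec : Claim_equal_generate_circular_permutations := by
  intro arr _
  unfold Spec_generate_circular_permutations generate_circular_permutations
    generate_circular_permutations_alt
  match arr with
  | [] => rfl
  | a0 :: rest =>
    simp only [pvPermsB_eq_foldl, PySem.List.foldl_append_singleton_eq_map, List.nil_append]
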